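-- pv_equiv track=rewrite | github.com/Shindou7/alx-higher_level_programming | 0x04-python-more_data_structures/102-complex_delete.py | complex_delete
-- ===== SOURCE A (Python) =====
-- def complex_delete(a_dictionary, value):
--     keys = []
--     for n, m in a_dictionary.items():
--         if m == value:
--             keys.append(n)
--     for n in keys:
--         del a_dictionary[n]
--     return a_dictionary
-- ===== SOURCE B (Python) =====
-- def complex_delete(a_dictionary, value):
--     kept = {k: v for k, v in a_dictionary.items() if v != value}
--     a_dictionary.clear()
--     a_dictionary.update(kept)
--     return a_dictionary
-- ===== Notes on version B (the rewrite author's own statement) =====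
-- stated objective: simpler
-- what changed: Instead of collecting matched keys and deleting them one by one from the dict, B builds the complement dict in one comprehension and rewrites the original in place with clear()+update().
import Mathlib
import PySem

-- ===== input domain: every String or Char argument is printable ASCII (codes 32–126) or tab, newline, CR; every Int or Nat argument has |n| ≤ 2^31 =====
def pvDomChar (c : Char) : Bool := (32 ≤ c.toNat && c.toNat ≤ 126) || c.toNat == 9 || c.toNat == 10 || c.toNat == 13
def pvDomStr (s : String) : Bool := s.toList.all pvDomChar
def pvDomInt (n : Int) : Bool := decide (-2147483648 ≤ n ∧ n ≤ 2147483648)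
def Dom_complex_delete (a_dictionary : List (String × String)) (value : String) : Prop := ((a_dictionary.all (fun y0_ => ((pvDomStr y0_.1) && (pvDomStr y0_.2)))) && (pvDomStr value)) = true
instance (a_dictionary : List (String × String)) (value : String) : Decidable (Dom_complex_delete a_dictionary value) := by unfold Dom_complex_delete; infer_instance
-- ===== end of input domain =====

-- B replaces A's collect-matched-keys-then-delete loop by building the complement dict and
-- rewriting the original in place (clear + update); objective: simpler. Python A and B both
-- mutate a_dictionary in place; the equivalence proved here is about the return value.


-- ===== PORT A =====
-- keys = [n for matched]; then 'del a_dictionary[n]' for each: under Pre_ (distinct keys,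
-- the invariant of a Python dict) deleting key n is removing the first pair with that key.
def complex_delete (a_dictionary : List (String × String)) (value : String) : List (String × String) :=
  let keys := a_dictionary.foldl (fun ks p => if p.2 == value then ks ++ [p.1] else ks) ([] : List String)
  keys.foldl (fun d n => d.eraseP (fun p => p.1 == n)) a_dictionary

-- ===== PORT B =====
-- kept = {k: v for k, v in a_dictionary.items() if v != value}; a_dictionary.clear();
-- a_dictionary.update(kept); return a_dictionary
def complex_delete_alt (a_dictionary : List (String × String)) (value : String) : List (String × String) :=
  let kept : PySem.Dict String String :=
    a_dictionary.foldl (fun d p => if p.2 != value then d.insert p.1 p.2 else d) PySem.Dict.empty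
  ((PySem.Dict.empty : PySem.Dict String String).update kept.items).items

-- ===== PRECONDITION & SPEC =====
-- Pre_ excludes association lists with duplicate keys: they cannot arise from a Python dict
-- (a Python dict literal/constructor collapses duplicates before the call).
def Pre_complex_delete (a_dictionary : List (String × String)) (value : String) : Prop :=
  (a_dictionary.map Prod.fst).Nodup
instance (a_dictionary : List (String × String)) (value : String) : Decidable (Pre_complex_delete a_dictionary value) := by unfold Pre_complex_delete; infer_instance
def pvWitness_complex_delete : (List (String × String)) × String := ([("a", "x"), ("b", "y")], "x")

def Spec_complex_delete (a_dictionary : List (String × String)) (value : String) (out : List (String × String)) : Prop := out = complex_delete_alt a_dictionary value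
instance (a_dictionary : List (String × String)) (value : String) (out : List (String × String)) : Decidable (Spec_complex_delete a_dictionary value out) := by unfold Spec_complex_delete; infer_instance

-- ===== CLAIM (what is proved, stated in full; the proofs are below) =====
def Claim_equal_complex_delete : Prop := ∀ (a_dictionary : List (String × String)) (value : String), Dom_complex_delete a_dictionary value → Pre_complex_delete a_dictionary value → Spec_complex_delete a_dictionary value (complex_delete a_dictionary value)

-- ===== LEMMAS AND PROOFS =====

-- erasing keys not equal to the head's key skips the head
theorem foldl_eraseP_cons_of_not_mem (ks : List String) (t : List (String × String))
    (n m : String) (hn : n ∉ ks) :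
    ks.foldl (fun d k => d.eraseP (fun p => p.1 == k)) ((n, m) :: t)
      = (n, m) :: ks.foldl (fun d k => d.eraseP (fun p => p.1 == k)) t := by
  induction ks generalizing t with
  | nil => rfl
  | cons k ks ih =>
    simp only [List.mem_cons, not_or] at hn
    simp only [List.foldl_cons, List.eraseP_cons]
    have hk : ((n, m).1 == k) = false := by simpa [beq_iff_eq] using hn.1
    simp only [hk, cond_false]
    exact ih _ hn.2

-- A's delete loop, fed the matched keys, is the complement filter (keys distinct)
theorem foldl_eraseP_keys (l : List (String × String)) (value : String)
    (hnd : (l.map Prod.fst).Nodup) :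
    ((l.filter (fun p => p.2 == value)).map Prod.fst).foldl
        (fun d k => d.eraseP (fun p => p.1 == k)) l
      = l.filter (fun p => p.2 != value) := by
  induction l with
  | nil => rfl
  | cons hd t ih =>
    obtain ⟨n, m⟩ := hd
    simp only [List.map_cons, List.nodup_cons] at hnd
    by_cases h : m = value
    · subst h
      simp only [List.filter_cons, beq_self_eq_true, if_pos, List.map_cons, List.foldl_cons,
        List.eraseP_cons, bne_self_eq_false, Bool.false_eq_true, if_false, beq_self_eq_true]
      exact ih hnd.2
    · have hkeys : n ∉ (t.filter (fun p => p.2 == value)).map Prod.fst := by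
        intro hmem
        exact hnd.1 (by
          rcases List.mem_map.mp hmem with ⟨p, hp, hp1⟩
          exact List.mem_map.mpr ⟨p, (List.mem_filter.mp hp).1, hp1⟩)
      have hb : (m == value) = false := by simpa [beq_iff_eq] using h
      simp only [List.filter_cons, hb, Bool.false_eq_true, if_false, bne, Bool.not_false, if_pos]
      rw [foldl_eraseP_cons_of_not_mem _ _ _ _ hkeys, ih hnd.2]
      simp [bne]

-- B's comprehension loop over fresh distinct keys collects the complement filter
theorem foldl_insert_if_items (value : String) (l : List (String × String))
    (d : PySem.Dict String String) (hnd : (d.keys ++ l.map Prod.fst).Nodup) :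
    (l.foldl (fun d p => if p.2 != value then d.insert p.1 p.2 else d) d).items
      = d.items ++ l.filter (fun p => p.2 != value) := by
  induction l generalizing d with
  | nil => simp
  | cons hd t ih =>
    obtain ⟨n, m⟩ := hd
    have hnotmem : n ∉ d.keys := by
      intro hmem
      exact (List.disjoint_of_nodup_append hnd) hmem (by simp)
    have hcont : d.contains n = false := by
      cases hc : d.contains n
      · rfl
      · exact absurd ((PySem.Dict.contains_iff_mem_keys d n).mp hc) hnotmem
    by_cases h : m = value
    · subst h
      simp only [List.foldl_cons, bne_self_eq_false, Bool.false_eq_true, if_false,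
        List.filter_cons, bne_self_eq_false]
      exact ih d (hnd.sublist ((List.append_sublist_append_left _).mpr
        (by simp)))
    · have hb : (m != value) = true := by simpa [bne, beq_iff_eq] using h
      simp only [List.foldl_cons, hb, if_pos, List.filter_cons]
      rw [ih (d.insert n m) (by
        rw [PySem.Dict.keys_insert_of_not_contains d m hcont]
        simpa using hnd)]
      rw [PySem.Dict.items_insert_of_not_contains d m hcont]
      simp
-- ===== VERDICT (by name: the statement is the Claim_ definition above) =====
theorem complex_delete_spec : Claim_equal_complex_delete := by
  intro l value _ hpre
  unfold Spec_complex_delete complex_delete complex_delete_alt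
  simp only [PySem.List.foldl_append_if, List.nil_append]
  rw [foldl_eraseP_keys l value hpre]
  have hkept := foldl_insert_if_items value l PySem.Dict.empty
    (by simpa [PySem.Dict.keys] using hpre)
  rw [hkept]
  have hfresh : ∀ p ∈ l.filter (fun p => p.2 != value),
      (PySem.Dict.empty : PySem.Dict String String).contains p.1 = false := by
    intro p _; simp
  have hndf : ((l.filter (fun p => p.2 != value)).map Prod.fst).Nodup :=
    hpre.sublist (List.Sublist.map Prod.fst List.filter_sublist)
  rw [show (PySem.Dict.empty : PySem.Dict String String).update
      (PySem.Dict.empty.items ++ l.filter (fun p => p.2 != value))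
    = (l.filter (fun p => p.2 != value)).foldl (fun acc p => acc.insert p.1 p.2)
        PySem.Dict.empty from by simp [PySem.Dict.update, PySem.Dict.empty]]
  rw [PySem.Dict.items_foldl_insert_fresh _ Prod.fst Prod.snd _ hfresh hndf]
  simp [PySem.Dict.empty]
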